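-- pv_equiv track=rewrite | github.com/hg0426/TENETPLUS | code/PreProcessScript_TE_Plus.py | create_cis_peaksource_pairs
-- ===== SOURCE A (Python) =====
-- def create_cis_peaksource_pairs(Peaks, genes_per_chromosome, gene_names_dict):
--     """Create cis peak->gene pairs."""
--     gene_pairs = []
--     for peak in Peaks:
--         peak_chr = peak.split("-")[0]
--         peak_idx = gene_names_dict.get(peak, None)
--         if peak_idx is not None:
--             gene_pairs.extend(
--                 [
--                     (peak_idx + 1, gene_names_dict[gene] + 1)
--                     for gene in genes_per_chromosome.get(peak_chr, [])
--                     if gene in gene_names_dict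
--                 ]
--             )
--     return gene_pairs
-- ===== SOURCE B (Python) =====
-- def create_cis_peaksource_pairs(Peaks, genes_per_chromosome, gene_names_dict):
--     """Create cis peak->gene pairs (memoised per-chromosome index table)."""
--     chrom_gene_idx = {
--         chrom: [gene_names_dict[g] + 1 for g in genes if g in gene_names_dict]
--         for chrom, genes in genes_per_chromosome.items()
--     }
--     return [
--         (gene_names_dict[peak] + 1, gi)
--         for peak in Peaks
--         if peak in gene_names_dict
--         for gi in chrom_gene_idx.get(peak.split("-")[0], [])
--     ]
-- ===== Notes on version B (the rewrite author's own statement) =====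
-- stated objective: alternative
-- what changed: B precomputes a dict mapping each chromosome to its list of adjusted gene indices once, then produces the pairs in a single flat comprehension over the peaks, instead of re-filtering and re-looking-up the chromosome's gene list inside the loop for every peak.
import Mathlib
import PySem

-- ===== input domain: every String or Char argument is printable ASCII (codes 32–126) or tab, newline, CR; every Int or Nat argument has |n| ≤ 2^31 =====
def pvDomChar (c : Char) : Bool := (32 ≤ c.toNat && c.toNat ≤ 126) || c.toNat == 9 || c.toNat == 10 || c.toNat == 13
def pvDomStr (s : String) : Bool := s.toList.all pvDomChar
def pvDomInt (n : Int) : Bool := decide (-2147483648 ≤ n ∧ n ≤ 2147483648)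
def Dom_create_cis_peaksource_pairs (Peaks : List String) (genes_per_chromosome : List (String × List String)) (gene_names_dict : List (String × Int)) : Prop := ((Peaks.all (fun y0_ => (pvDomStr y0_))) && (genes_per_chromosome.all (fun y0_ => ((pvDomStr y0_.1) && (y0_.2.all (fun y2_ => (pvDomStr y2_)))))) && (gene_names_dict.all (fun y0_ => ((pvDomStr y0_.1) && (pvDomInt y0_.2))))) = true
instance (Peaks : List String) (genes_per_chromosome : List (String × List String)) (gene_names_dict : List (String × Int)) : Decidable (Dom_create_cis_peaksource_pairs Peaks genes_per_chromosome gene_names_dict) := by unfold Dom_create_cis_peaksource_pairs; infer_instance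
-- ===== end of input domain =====

-- B builds the per-chromosome list of adjusted gene indices once and then flat-maps the peaks over it,
-- instead of re-filtering the chromosome's gene list for every peak (objective: alternative decomposition).


-- ===== PORT A =====
-- first-match association-list lookup (the Lean image of Python dict .get / [] / in, per the type convention)
def pvLookupInt (d : List (String × Int)) (k : String) : Option Int :=
  (d.find? (fun p => p.1 == k)).map Prod.snd

def pvLookupGenes (d : List (String × List String)) (k : String) : List String :=
  ((d.find? (fun p => p.1 == k)).map Prod.snd).getD []

-- peak.split("-")[0]: split? is `some` since the separator "-" ≠ "", and the resulting list is
-- never empty, so neither `getD` default ever fires — exact on all inputs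
def pvPeakChr (peak : String) : String :=
  PySem.List.pyGetD ((PySem.Str.split? peak "-").getD []) 0 ""

def create_cis_peaksource_pairs (Peaks : List String) (genes_per_chromosome : List (String × List String)) (gene_names_dict : List (String × Int)) : List (Int × Int) :=
  Peaks.foldl (fun gene_pairs peak =>
    let peak_chr := pvPeakChr peak
    match pvLookupInt gene_names_dict peak with
    | none => gene_pairs
    | some peak_idx =>
        gene_pairs ++
          ((pvLookupGenes genes_per_chromosome peak_chr).filter
              (fun gene => (pvLookupInt gene_names_dict gene).isSome)).map
            (fun gene => (peak_idx + 1, (pvLookupInt gene_names_dict gene).getD 0 + 1))) []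

-- ===== PORT B =====
def create_cis_peaksource_pairs_alt (Peaks : List String) (genes_per_chromosome : List (String × List String)) (gene_names_dict : List (String × Int)) : List (Int × Int) :=
  let chrom_gene_idx : List (String × List Int) :=
    genes_per_chromosome.map (fun cg =>
      (cg.1, (cg.2.filter (fun g => (pvLookupInt gene_names_dict g).isSome)).map
               (fun g => (pvLookupInt gene_names_dict g).getD 0 + 1)))
  Peaks.flatMap (fun peak =>
    match pvLookupInt gene_names_dict peak with
    | none => []
    | some peak_idx =>
        (((chrom_gene_idx.find? (fun p => p.1 == pvPeakChr peak)).map Prod.snd).getD []).map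
          (fun gi => (peak_idx + 1, gi)))

-- ===== PRECONDITION & SPEC =====
def Spec_create_cis_peaksource_pairs (Peaks : List String) (genes_per_chromosome : List (String × List String)) (gene_names_dict : List (String × Int)) (out : List (Int × Int)) : Prop := out = create_cis_peaksource_pairs_alt Peaks genes_per_chromosome gene_names_dict
instance (Peaks : List String) (genes_per_chromosome : List (String × List String)) (gene_names_dict : List (String × Int)) (out : List (Int × Int)) : Decidable (Spec_create_cis_peaksource_pairs Peaks genes_per_chromosome gene_names_dict out) := by unfold Spec_create_cis_peaksource_pairs; infer_instance

-- ===== CLAIM (what is proved, stated in full; the proofs are below) =====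
def Claim_equal_create_cis_peaksource_pairs : Prop := ∀ (Peaks : List String) (genes_per_chromosome : List (String × List String)) (gene_names_dict : List (String × Int)), Dom_create_cis_peaksource_pairs Peaks genes_per_chromosome gene_names_dict → Spec_create_cis_peaksource_pairs Peaks genes_per_chromosome gene_names_dict (create_cis_peaksource_pairs Peaks genes_per_chromosome gene_names_dict)

-- ===== LEMMAS AND PROOFS =====
-- looking up the memo table equals filtering+mapping the raw chromosome list
theorem pv_memo_lookup (gpc : List (String × List String)) (gnd : List (String × Int)) (c : String) :
    (((gpc.map (fun cg =>
        (cg.1, (cg.2.filter (fun g => (pvLookupInt gnd g).isSome)).map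
                 (fun g => (pvLookupInt gnd g).getD 0 + 1)))).find? (fun p => p.1 == c)).map Prod.snd).getD []
    = ((pvLookupGenes gpc c).filter (fun g => (pvLookupInt gnd g).isSome)).map
        (fun g => (pvLookupInt gnd g).getD 0 + 1) := by
  induction gpc with
  | nil => simp [pvLookupGenes]
  | cons hd tl ih =>
      by_cases h : hd.1 == c
      · simp [pvLookupGenes, List.find?, h]
      · simpa [pvLookupGenes, List.find?, h] using ih

-- the two per-peak contributions coincide
theorem pv_per_peak (gpc : List (String × List String)) (gnd : List (String × Int)) (peak : String) :
    (match pvLookupInt gnd peak with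
     | none => ([] : List (Int × Int))
     | some peak_idx =>
         ((((gpc.map (fun cg =>
             (cg.1, (cg.2.filter (fun g => (pvLookupInt gnd g).isSome)).map
                      (fun g => (pvLookupInt gnd g).getD 0 + 1)))).find?
             (fun p => p.1 == pvPeakChr peak)).map Prod.snd).getD []).map
           (fun gi => (peak_idx + 1, gi)))
    = (match pvLookupInt gnd peak with
       | none => ([] : List (Int × Int))
       | some peak_idx =>
           ((pvLookupGenes gpc (pvPeakChr peak)).filter
               (fun gene => (pvLookupInt gnd gene).isSome)).map
             (fun gene => (peak_idx + 1, (pvLookupInt gnd gene).getD 0 + 1))) := by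
  cases pvLookupInt gnd peak with
  | none => rfl
  | some i =>
      rw [pv_memo_lookup]
      simp [List.map_map, Function.comp]

-- ===== VERDICT (by name: the statement is the Claim_ definition above) =====
theorem create_cis_peaksource_pairs_spec : Claim_equal_create_cis_peaksource_pairs := by
  intro Peaks gpc gnd hD
  clear hD
  unfold Spec_create_cis_peaksource_pairs create_cis_peaksource_pairs create_cis_peaksource_pairs_alt
  have hfold : ∀ (acc : List (Int × Int)),
      Peaks.foldl (fun gene_pairs peak =>
        let peak_chr := pvPeakChr peak
        match pvLookupInt gnd peak with
        | none => gene_pairs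
        | some peak_idx =>
            gene_pairs ++
              ((pvLookupGenes gpc peak_chr).filter
                  (fun gene => (pvLookupInt gnd gene).isSome)).map
                (fun gene => (peak_idx + 1, (pvLookupInt gnd gene).getD 0 + 1))) acc
      = acc ++ Peaks.flatMap (fun peak =>
          match pvLookupInt gnd peak with
          | none => []
          | some peak_idx =>
              ((pvLookupGenes gpc (pvPeakChr peak)).filter
                  (fun gene => (pvLookupInt gnd gene).isSome)).map
                (fun gene => (peak_idx + 1, (pvLookupInt gnd gene).getD 0 + 1))) := by
    intro acc
    induction Peaks generalizing acc with
    | nil => simp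
    | cons p ps ih =>
        simp only [List.foldl_cons, List.flatMap_cons]
        cases h : pvLookupInt gnd p with
        | none => simpa [h] using ih acc
        | some i => simp only [ih, List.append_assoc]
  rw [hfold []]
  simp only [List.nil_append]
  exact congrArg (fun f => List.flatMap f Peaks) (funext fun peak => (pv_per_peak gpc gnd peak).symm)
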